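-- pv_equiv track=rewrite | github.com/YukunQu/DCM | analysis/mri/event/cv/event_game1_cv.py | split_whole_trials
-- ===== SOURCE A (Python) =====
-- def split_whole_trials(trial_corr):
--     trial_label = []
--     for i in range(1, len(trial_corr) + 1):
--         if i % 2 == 0:
--             trial_label.append('even')
--         else:
--             trial_label.append('odd')
--     return trial_label
-- ===== SOURCE B (Python) =====
-- def split_whole_trials(trial_corr):
--     n = len(trial_corr)
--     return (['odd', 'even'] * n)[:n]
-- ===== Notes on version B (the rewrite author's own statement) =====
-- stated objective: simpler
-- what changed: Replaces the per-index loop with its parity test by repeating the fixed ['odd','even'] pattern and slicing to the list's length.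
import Mathlib
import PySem

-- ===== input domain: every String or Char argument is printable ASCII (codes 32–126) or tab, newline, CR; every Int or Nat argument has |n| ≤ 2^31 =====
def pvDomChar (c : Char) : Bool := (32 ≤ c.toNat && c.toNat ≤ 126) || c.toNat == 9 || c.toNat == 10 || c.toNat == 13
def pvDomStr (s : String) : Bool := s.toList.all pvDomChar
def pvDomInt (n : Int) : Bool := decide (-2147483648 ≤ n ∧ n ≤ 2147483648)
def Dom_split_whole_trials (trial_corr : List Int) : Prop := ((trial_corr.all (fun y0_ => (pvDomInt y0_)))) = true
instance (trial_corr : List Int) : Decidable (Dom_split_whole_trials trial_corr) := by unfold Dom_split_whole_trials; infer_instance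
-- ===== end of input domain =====

-- ===== PORT A =====
-- B rebuilds the alternating labels by repeating the fixed pattern ['odd','even'] and slicing
-- to the input length, instead of A's indexed loop with a parity test (objective: simpler).
def split_whole_trials (trial_corr : List Int) : List String :=
  (PySem.List.pyRange 1 ((trial_corr.length : Int) + 1) 1).foldl
    (fun trial_label i => trial_label ++ [if PySem.Int.mod i 2 == 0 then "even" else "odd"]) []

-- ===== PORT B =====
def split_whole_trials_alt (trial_corr : List Int) : List String :=
  let n := trial_corr.length
  PySem.List.slice (PySem.List.pyRepeat ["odd", "even"] (n : Int)) none (some (n : Int))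

-- ===== PRECONDITION & SPEC =====
def Spec_split_whole_trials (trial_corr : List Int) (out : List String) : Prop := out = split_whole_trials_alt trial_corr
instance (trial_corr : List Int) (out : List String) : Decidable (Spec_split_whole_trials trial_corr out) := by unfold Spec_split_whole_trials; infer_instance

-- ===== CLAIM (what is proved, stated in full; the proofs are below) =====
def Claim_equal_split_whole_trials : Prop := ∀ (trial_corr : List Int), Dom_split_whole_trials trial_corr → Spec_split_whole_trials trial_corr (split_whole_trials trial_corr)

-- ===== LEMMAS AND PROOFS =====

-- ===== VERDICT (by name: the statement is the Claim_ definition above) =====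
lemma pv_flat_get? (m i : ℕ) (h : i < 2 * m) :
    ((List.replicate m (["odd", "even"] : List String)).flatten)[i]? =
      some (if i % 2 = 0 then "odd" else "even") := by
  induction m generalizing i with
  | zero => omega
  | succ m ih =>
    match i with
    | 0 => simp [List.replicate_succ]
    | 1 => simp [List.replicate_succ]
    | (j + 2) =>
      have hj : j < 2 * m := by omega
      have h2 : ((j + 2) % 2) = j % 2 := by omega
      simp [List.replicate_succ, h2, ih j hj]

lemma pv_flatMap_single {α : Type} (l : List α) (g : α → String) :
    l.flatMap (fun k => [g k]) = l.map g := by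
  induction l <;> simp_all

lemma pv_main (n : ℕ) :
    (PySem.List.pyRange 1 ((n : Int) + 1) 1).foldl
      (fun trial_label i => trial_label ++ [if PySem.Int.mod i 2 == 0 then "even" else "odd"]) []
    = PySem.List.slice (PySem.List.pyRepeat ["odd", "even"] (n : Int)) none (some (n : Int)) := by
  rw [PySem.List.slice_to_natCast]
  rw [PySem.List.foldl_append_eq_flatMap]
  rw [PySem.List.pyRange_one]
  have hrange : (((n : Int) + 1 - 1).toNat) = n := by omega
  rw [hrange]
  rw [pv_flatMap_single]
  simp only [PySem.List.pyRepeat, Int.toNat_natCast, List.nil_append]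
  apply List.ext_getElem?
  intro i
  by_cases hi : i < n
  · rw [List.getElem?_take_of_lt hi, pv_flat_get? n i (by omega)]
    rw [List.getElem?_map, List.getElem?_map, List.getElem?_range hi]
    by_cases hp : i % 2 = 0
    · simp [hp, PySem.Int.mod, Int.fmod_eq_emod]
      omega
    · simp [hp, PySem.Int.mod, Int.fmod_eq_emod]
      omega
  · rw [List.getElem?_eq_none, List.getElem?_eq_none]
    · simp; omega
    · simp; omega

theorem split_whole_trials_spec : Claim_equal_split_whole_trials := by
  intro trial_corr _
  show _ = _
  unfold split_whole_trials split_whole_trials_alt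
  exact pv_main trial_corr.length
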